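-- pv_equiv track=rewrite | github.com/ky8778/study_algorithm | BOJ/BruteForce/BJ1436영화감독숌_KY.py | isFinal
-- ===== SOURCE A (Python) =====
-- def isFinal(n):
--     cnt = 0
--     while n>0:
--         if n%10==6:
--             cnt+=1
--         else:
--             cnt=0
--         if cnt>=3:
--             return 1
--         n//=10
--     return 0
-- ===== SOURCE B (Python) =====
-- def isFinal(n):
--     return 1 if n > 0 and '666' in str(n) else 0
-- ===== Notes on version B (the rewrite author's own statement) =====
-- stated objective: idiomatic
-- what changed: Replaces the arithmetic digit-extraction loop with its running consecutive-6 counter by converting n to its decimal string and testing for the substring '666' (guarded by n > 0, where A's loop runs at all).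
import Mathlib
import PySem

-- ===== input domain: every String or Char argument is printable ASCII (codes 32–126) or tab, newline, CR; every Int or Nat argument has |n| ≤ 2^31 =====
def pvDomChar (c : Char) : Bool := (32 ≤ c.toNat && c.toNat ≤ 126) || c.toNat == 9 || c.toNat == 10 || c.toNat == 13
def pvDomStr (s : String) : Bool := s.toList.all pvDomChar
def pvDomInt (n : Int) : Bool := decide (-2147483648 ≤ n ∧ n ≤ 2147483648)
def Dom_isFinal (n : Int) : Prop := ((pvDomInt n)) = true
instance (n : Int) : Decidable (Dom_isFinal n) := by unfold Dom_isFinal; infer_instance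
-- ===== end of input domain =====

-- B replaces A's digit-extraction loop with a consecutive-6 counter by the idiomatic
-- substring test `'666' in str(n)` (guarded by n > 0, the only case A's loop runs).

-- ===== PORT A =====
-- while n>0: counter of consecutive trailing 6s; the dependent if only provides the
-- termination hypothesis, the computation is A's loop verbatim.
def isFinalLoop (n : Int) (cnt : Int) : Int :=
  if h : 0 < n then
    let cnt' := if PySem.Int.mod n 10 = 6 then cnt + 1 else 0
    if 3 ≤ cnt' then 1
    else isFinalLoop (PySem.Int.floordiv n 10) cnt'
  else 0
termination_by n.toNat
decreasing_by
  rw [PySem.Int.floordiv_eq_ediv_of_pos (by norm_num)]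
  omega

def isFinal (n : Int) : Int := isFinalLoop n 0

-- ===== PORT B =====
def isFinal_alt (n : Int) : Int :=
  if 0 < n ∧ PySem.Str.isIn "666" (PySem.Int.toStr n) then 1 else 0

-- ===== PRECONDITION & SPEC =====
def Spec_isFinal (n : Int) (out : Int) : Prop := out = isFinal_alt n
instance (n : Int) (out : Int) : Decidable (Spec_isFinal n out) := by unfold Spec_isFinal; infer_instance

-- ===== CLAIM (what is proved, stated in full; the proofs are below) =====
def Claim_equal_isFinal : Prop := ∀ (n : Int), Dom_isFinal n → Spec_isFinal n (isFinal n)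

-- ===== LEMMAS AND PROOFS =====

-- proof-only helper: "some suffix of m has last three digits 666", mirrors the infix test
def pvChk (m : Nat) : Bool :=
  if m < 100 then false
  else if m % 1000 = 666 then true else pvChk (m / 10)
termination_by m
decreasing_by omega

lemma pvChk_low {m : Nat} (h : m < 100) : pvChk m = false := by
  rw [pvChk]; simp [h]

lemma pvChk_high {m : Nat} (h : ¬ m < 100) :
    pvChk m = true ↔ m % 1000 = 666 ∨ pvChk (m / 10) = true := by
  rw [pvChk, if_neg h]
  by_cases h6 : m % 1000 = 666 <;> simp [h6]

-- fuel elimination for Nat.toDigitsCore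
lemma pvTdc (n : Nat) : ∀ (f : Nat) (acc : List Char), n < f →
    Nat.toDigitsCore 10 f n acc = Nat.toDigits 10 n ++ acc := by
  induction n using Nat.strong_induction_on with
  | _ n ih =>
    intro f acc hf
    match f with
    | f + 1 =>
      by_cases h0 : n / 10 = 0
      · simp [Nat.toDigitsCore, Nat.toDigits, h0]
      · have e1 : Nat.toDigitsCore 10 (f + 1) n acc
            = Nat.toDigitsCore 10 f (n / 10) (Nat.digitChar (n % 10) :: acc) := by
          simp [Nat.toDigitsCore, h0]
      -- n ≥ 10, so n/10 < n ≤ f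
        have e2 : Nat.toDigits 10 n
            = Nat.toDigitsCore 10 n (n / 10) [Nat.digitChar (n % 10)] := by
          simp [Nat.toDigits, Nat.toDigitsCore, h0]
        rw [e1, ih (n / 10) (by omega) f _ (by omega),
            e2, ih (n / 10) (by omega) n _ (by omega)]
        simp

lemma pvToDigits_lt {m : Nat} (h : m < 10) :
    Nat.toDigits 10 m = [Nat.digitChar m] := by
  simp [Nat.toDigits, Nat.toDigitsCore, Nat.div_eq_of_lt h, Nat.mod_eq_of_lt h]

lemma pvToDigits_ge {m : Nat} (h : 10 ≤ m) :
    Nat.toDigits 10 m = Nat.toDigits 10 (m / 10) ++ [Nat.digitChar (m % 10)] := by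
  have h0 : ¬ m / 10 = 0 := by omega
  have e2 : Nat.toDigits 10 m
      = Nat.toDigitsCore 10 m (m / 10) [Nat.digitChar (m % 10)] := by
    simp [Nat.toDigits, Nat.toDigitsCore, h0]
  rw [e2, pvTdc (m / 10) m _ (by omega)]

lemma pvToDigits_len2 {m : Nat} (h : m < 100) : (Nat.toDigits 10 m).length ≤ 2 := by
  by_cases h1 : m < 10
  · simp [pvToDigits_lt h1]
  · rw [pvToDigits_ge (by omega)]
    rw [pvToDigits_lt (show m / 10 < 10 by omega)]
    simp

lemma pvSplit3 {m : Nat} (h : 100 ≤ m) : ∃ l, Nat.toDigits 10 m =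
    l ++ [Nat.digitChar (m / 100 % 10), Nat.digitChar (m / 10 % 10), Nat.digitChar (m % 10)] := by
  have d1 : m / 10 / 10 = m / 100 := by omega
  rw [pvToDigits_ge (show 10 ≤ m by omega), pvToDigits_ge (show 10 ≤ m / 10 by omega), d1]
  by_cases h2 : m / 100 < 10
  · exact ⟨[], by rw [pvToDigits_lt h2, Nat.mod_eq_of_lt h2]; simp⟩
  · refine ⟨Nat.toDigits 10 (m / 100 / 10), ?_⟩
    rw [pvToDigits_ge (by omega)]
    simp

lemma pvDigitChar_six {k : Nat} (hk : k < 10) : Nat.digitChar k = '6' ↔ k = 6 := by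
  interval_cases k <;> simp [Nat.digitChar]

lemma pvSuffix3 {m : Nat} (h : 100 ≤ m) :
    (['6', '6', '6'] <:+ Nat.toDigits 10 m) ↔ m % 1000 = 666 := by
  obtain ⟨l, hl⟩ := pvSplit3 h
  rw [hl]
  constructor
  · intro hs
    have he := List.suffix_iff_eq_drop.mp hs
    have hlen : (l ++ [Nat.digitChar (m / 100 % 10), Nat.digitChar (m / 10 % 10),
        Nat.digitChar (m % 10)]).length - (['6', '6', '6'] : List Char).length = l.length := by
      simp
    rw [hlen, List.drop_left] at he
    have h1 := (pvDigitChar_six (Nat.mod_lt _ (by norm_num))).mp (congrArg (·[0]!) he).symm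
    have h2 := (pvDigitChar_six (Nat.mod_lt _ (by norm_num))).mp (congrArg (·[1]!) he).symm
    have h3 := (pvDigitChar_six (Nat.mod_lt _ (by norm_num))).mp (congrArg (·[2]!) he).symm
    omega
  · intro h6
    have e1 : m / 100 % 10 = 6 := by omega
    have e2 : m / 10 % 10 = 6 := by omega
    have e3 : m % 10 = 6 := by omega
    rw [e1, e2, e3]
    exact List.suffix_append _ _

lemma pvInfix_append_singleton (p l : List Char) (d : Char) :
    p <:+: (l ++ [d]) ↔ p <:+: l ∨ p <:+ (l ++ [d]) := by
  have h1 : p <:+: (l ++ [d]) ↔ p.reverse <:+: (d :: l.reverse) := by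
    rw [← List.reverse_infix]; simp
  rw [h1, List.infix_cons_iff]
  constructor
  · rintro (h | h)
    · right
      rw [← List.reverse_prefix]
      simpa using h
    · left
      rwa [List.reverse_infix] at h
  · rintro (h | h)
    · right
      rwa [← List.reverse_infix] at h
    · left
      rw [← List.reverse_prefix] at h
      simpa using h

lemma pvChk_iff (m : Nat) : pvChk m = true ↔ (['6', '6', '6'] <:+: Nat.toDigits 10 m) := by
  induction m using Nat.strong_induction_on with
  | _ m ih =>
    by_cases h : m < 100
    · rw [pvChk_low h]
      simp only [Bool.false_eq_true, false_iff]
      intro hc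
      have h3 := hc.length_le
      simp only [List.length_cons, List.length_nil] at h3
      have := pvToDigits_len2 h
      omega
    · rw [pvChk_high h, pvToDigits_ge (show 10 ≤ m by omega), pvInfix_append_singleton,
          ih (m / 10) (by omega), ← pvToDigits_ge (show 10 ≤ m by omega), pvSuffix3 (by omega)]
      tauto

-- characterization of A's loop
lemma pvLoopA_char (m : Nat) : ∀ (cnt : Int), 0 ≤ cnt → cnt ≤ 2 →
    isFinalLoop (m : Int) cnt =
      if (2 ≤ cnt ∧ m % 10 = 6 ∧ 0 < m) ∨ (1 ≤ cnt ∧ m % 100 = 66) ∨ pvChk m = true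
      then 1 else 0 := by
  induction m using Nat.strong_induction_on with
  | _ m ih =>
    intro cnt h0 h2
    rw [isFinalLoop]
    by_cases hm : 0 < m
    · have hpos : (0 : Int) < (m : Int) := by exact_mod_cast hm
      simp only [hpos, dif_pos]
      have hmod : PySem.Int.mod (m : Int) 10 = ((m % 10 : Nat) : Int) := by
        exact_mod_cast PySem.Int.mod_natCast m 10
      have hdiv : PySem.Int.floordiv (m : Int) 10 = ((m / 10 : Nat) : Int) := by
        exact_mod_cast PySem.Int.floordiv_natCast m 10
      by_cases h6 : m % 10 = 6
      · have hm6 : PySem.Int.mod (m : Int) 10 = 6 := by rw [hmod, h6]; norm_num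
        simp only [hm6, if_true]
        by_cases hc2 : 3 ≤ cnt + 1
        · have : cnt = 2 := by omega
          simp only [hc2, if_pos]
          simp [this, h6, hm]
        · simp only [hc2, if_false]
          rw [hdiv, ih (m / 10) (by omega) (cnt + 1) (by omega) (by omega)]
          congr 1
          simp only [eq_iff_iff]
          by_cases hq : pvChk (m / 10) = true
          · -- m/10 has a 666 somewhere, so does m
            have hcm : pvChk m = true := by
              by_cases hlt : m < 100
              · exact absurd (pvChk_low (show m / 10 < 100 by omega) ▸ hq) (by simp)
              · exact (pvChk_high hlt).mpr (Or.inr hq)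
            simp [hq, hcm]
          · by_cases hlt : m < 100
            · have hcm : pvChk m = false := pvChk_low hlt
              have hcq : pvChk (m / 10) = false := by simpa using hq
              simp [hcm, hcq]
              omega
            · rw [pvChk_high hlt]
              simp [hq]
              omega
      · have hm6 : ¬ PySem.Int.mod (m : Int) 10 = 6 := by
          rw [hmod]; omega
        rw [if_neg hm6, if_neg (show ¬ (3:Int) ≤ 0 by norm_num)]
        rw [hdiv, ih (m / 10) (by omega) 0 (by omega) (by omega)]
        congr 1
        simp only [eq_iff_iff]
        norm_num
        by_cases hlt : m < 100
        · have hcm : pvChk m = false := pvChk_low hlt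
          have hcq : pvChk (m / 10) = false := pvChk_low (by omega)
          simp [hcm, hcq]
          omega
        · rw [pvChk_high hlt]
          by_cases hq : pvChk (m / 10) = true
          · simp [hq]
          · simp [hq]
            omega
    · have hm0 : m = 0 := by omega
      subst hm0
      rw [dif_neg (show ¬ (0 : Int) < ((0 : Nat) : Int) by norm_num)]
      have hc : pvChk 0 = false := pvChk_low (by norm_num)
      simp [hc]

lemma pvAlt_char {n : Int} (hn : 0 < n) :
    (PySem.Str.isIn "666" (PySem.Int.toStr n) = true) ↔
      (['6', '6', '6'] <:+: Nat.toDigits 10 n.toNat) := by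
  rw [PySem.Str.isIn_iff_infix, PySem.Int.toList_toStr]
  have h1 : PySem.Int.toChars n = Nat.toDigits 10 n.toNat := by
    simp [PySem.Int.toChars, show ¬ n < 0 by omega]
  have h2 : "666".toList = ['6', '6', '6'] := by decide
  rw [h1, h2]

-- ===== VERDICT (by name: the statement is the Claim_ definition above) =====
theorem isFinal_spec : Claim_equal_isFinal := by
  intro n _
  show isFinal n = isFinal_alt n
  by_cases hn : 0 < n
  · have hcast : ((n.toNat : Nat) : Int) = n := by omega
    have hm := pvLoopA_char n.toNat 0 (by norm_num) (by norm_num)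
    rw [hcast] at hm
    rw [isFinal, hm]
    simp only [show ¬ (2 : Int) ≤ 0 by norm_num, show ¬ (1 : Int) ≤ 0 by norm_num,
      false_and, false_or]
    rw [isFinal_alt]
    by_cases hc : pvChk n.toNat = true
    · rw [if_pos hc, if_pos ⟨hn, (pvAlt_char hn).mpr ((pvChk_iff n.toNat).mp hc)⟩]
    · have hb : ¬ PySem.Str.isIn "666" (PySem.Int.toStr n) = true := fun hb =>
        hc ((pvChk_iff n.toNat).mpr ((pvAlt_char hn).mp hb))
      rw [if_neg hc, if_neg (fun hand => hb hand.2)]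
  · rw [isFinal, isFinalLoop, dif_neg hn, isFinal_alt, if_neg (fun hand => hn hand.1)]
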